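-- pv_equiv track=rewrite | github.com/hwennnn/leetcode-solutions | problems/sum_game/solution.py | sumGame
-- ===== SOURCE A (Python) =====
-- def sumGame(nums: str) -> bool:
--     n = len(nums)
--     half = n // 2
--     left_sum = sum(int(c) for c in nums[:half] if c != '?')
--     right_sum = sum(int(c) for c in nums[half:] if c != '?')
--     left_count = nums[:half].count('?')
--     right_count = nums[half:].count('?')
--
--     def canAliceWin(left_sum, right_sum, left_count, right_count):
--         for i in range(left_count + right_count):
--             if i % 2 == 0:
--                 if left_count > 0:
--                     left_sum += 9
--                     left_count -= 1
--                 else: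
--                     right_count -= 1
--             else:
--                 if right_count > 0:
--                     right_sum += 9
--                     right_count -= 1
--                 else:
--                     left_count -= 1
--
--         return left_sum != right_sum
--
--     return canAliceWin(left_sum, right_sum, left_count, right_count) or canAliceWin(right_sum, left_sum, right_count, left_count)
-- ===== SOURCE B (Python) =====
-- def sumGame(nums: str) -> bool:
--     half = len(nums) // 2
--     left_sum = right_sum = left_count = right_count = 0
--     for i, c in enumerate(nums):
--         if i < half:
--             if c == '?':
--                 left_count += 1
--             else:
--                 left_sum += int(c)
--         else:
--             if c == '?':
--                 right_count += 1
--             else: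
--                 right_sum += int(c)
--     q = left_count + right_count
--     if q % 2 == 1:
--         return True
--     return 9 * (right_count - left_count) != 2 * (left_sum - right_sum)
-- ===== Notes on version B (the rewrite author's own statement) =====
-- stated objective: simpler
-- what changed: One enumerate pass replaces the four slice passes, and a closed-form parity/arithmetic test (q odd, or 9*(right_count-left_count) != 2*(left_sum-right_sum)) replaces the two turn-by-turn greedy simulations.
import Mathlib
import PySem

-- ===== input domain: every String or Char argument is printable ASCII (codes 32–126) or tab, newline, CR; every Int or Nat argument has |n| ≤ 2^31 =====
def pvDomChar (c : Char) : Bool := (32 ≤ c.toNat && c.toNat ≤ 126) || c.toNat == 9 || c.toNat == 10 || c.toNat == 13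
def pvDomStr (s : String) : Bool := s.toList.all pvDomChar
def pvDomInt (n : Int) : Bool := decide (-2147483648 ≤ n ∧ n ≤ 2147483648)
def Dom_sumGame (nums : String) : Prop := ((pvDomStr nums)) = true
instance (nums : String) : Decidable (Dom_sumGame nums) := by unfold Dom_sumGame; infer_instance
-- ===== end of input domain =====

-- B is simpler: one enumerate pass + a closed-form parity/arithmetic test replaces A's four
-- slice passes + two turn-by-turn greedy simulations; same O(n) cost, equal return values on Pre_.

-- ===== PORT A =====

-- int(c) for a one-character string; Pre_ restricts to digit characters, where this is exact
def pyIntChar (c : Char) : Int := (PySem.Int.ofChars? [c]).getD 0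

-- the body of canAliceWin's for-loop (i is the range index)
def aLoopStep (st : Int × Int × Int × Int) (i : Int) : Int × Int × Int × Int :=
  let (ls, rs, lc, rc) := st
  if PySem.Int.mod i 2 == 0 then
    if lc > 0 then (ls + 9, rs, lc - 1, rc) else (ls, rs, lc, rc - 1)
  else
    if rc > 0 then (ls, rs + 9, lc, rc - 1) else (ls, rs, lc - 1, rc)

-- the nested def canAliceWin: the for-loop over range(left_count + right_count) as a foldl
def canAliceWinA (ls rs lc rc : Int) : Bool :=
  let s := (PySem.List.pyRange 0 (lc + rc) 1).foldl aLoopStep (ls, rs, lc, rc)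
  s.1 != s.2.1

def sumGame (nums : String) : Bool :=
  let cs := nums.toList
  let n : Int := PySem.Str.len nums
  let half : Int := PySem.Int.floordiv n 2
  let leftL := PySem.List.slice cs none (some half)
  let rightL := PySem.List.slice cs (some half) none
  let left_sum := leftL.foldl (fun acc c => if c != '?' then acc + pyIntChar c else acc) 0
  let right_sum := rightL.foldl (fun acc c => if c != '?' then acc + pyIntChar c else acc) 0
  let left_count : Int := (PySem.List.count leftL '?' : Nat)
  let right_count : Int := (PySem.List.count rightL '?' : Nat)
  canAliceWinA left_sum right_sum left_count right_count ||
    canAliceWinA right_sum left_sum right_count left_count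

-- ===== PORT B =====

-- the body of B's single enumerate loop
def bStep (half : Int) (st : Int × Int × Int × Int) (p : Int × Char) : Int × Int × Int × Int :=
  let (ls, rs, lc, rc) := st
  if p.2 = '?' then
    if p.1 < half then (ls, rs, lc + 1, rc) else (ls, rs, lc, rc + 1)
  else
    if p.1 < half then (ls + pyIntChar p.2, rs, lc, rc) else (ls, rs + pyIntChar p.2, lc, rc)

def sumGame_alt (nums : String) : Bool :=
  let cs := nums.toList
  let half : Int := PySem.Int.floordiv (PySem.Str.len nums) 2
  let st := (PySem.List.enumerate cs 0).foldl (bStep half) (0, 0, 0, 0)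
  let q := st.2.2.1 + st.2.2.2
  if PySem.Int.mod q 2 == 1 then true
  else 9 * (st.2.2.2 - st.2.2.1) != 2 * (st.1 - st.2.1)

-- ===== PRECONDITION & SPEC =====
-- A raises ValueError (int(c)) on any character other than '0'-'9' and '?'; Pre_ excludes exactly those
def Pre_sumGame (nums : String) : Prop :=
  nums.toList.all (fun c => ('0' ≤ c && c ≤ '9') || c == '?') = true
instance (nums : String) : Decidable (Pre_sumGame nums) := by unfold Pre_sumGame; infer_instance

def pvWitness_sumGame : String := "1?"

def Spec_sumGame (nums : String) (out : Bool) : Prop := out = sumGame_alt nums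
instance (nums : String) (out : Bool) : Decidable (Spec_sumGame nums out) := by unfold Spec_sumGame; infer_instance

-- ===== CLAIM (what is proved, stated in full; the proofs are below) =====
def Claim_equal_sumGame : Prop := ∀ (nums : String), Dom_sumGame nums → Pre_sumGame nums → Spec_sumGame nums (sumGame nums)

-- ===== LEMMAS AND PROOFS =====

-- A's loop body as a function of the parity of the index
def aStepP (e : Bool) (st : Int × Int × Int × Int) : Int × Int × Int × Int :=
  let (ls, rs, lc, rc) := st
  if e then
    if lc > 0 then (ls + 9, rs, lc - 1, rc) else (ls, rs, lc, rc - 1)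
  else
    if rc > 0 then (ls, rs + 9, lc, rc - 1) else (ls, rs, lc - 1, rc)

-- A's loop, abstracted to (number of remaining iterations, parity of the current index)
def gg : Nat → Bool → Int × Int × Int × Int → Int × Int × Int × Int
  | 0, _, s => s
  | n + 1, e, s => gg n (!e) (aStepP e s)

theorem aLoopStep_eq (st : Int × Int × Int × Int) (i : Int) :
    aLoopStep st i = aStepP (PySem.Int.mod i 2 == 0) st := by
  rcases st with ⟨ls, rs, lc, rc⟩; rfl

theorem mod_two_flip (a : Int) :
    (PySem.Int.mod (a + 1) 2 == 0) = !(PySem.Int.mod a 2 == 0) := by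
  rw [PySem.Int.mod_eq_emod_of_pos (a := a) (by norm_num),
      PySem.Int.mod_eq_emod_of_pos (a := a + 1) (by norm_num)]
  rcases Int.emod_two_eq a with h | h <;>
    · have h2 : (a + 1) % 2 = 1 - a % 2 := by omega
      simp [h, h2]

theorem foldl_pyRange_gg (q : Nat) : ∀ (a : Int) (st : Int × Int × Int × Int),
    (PySem.List.pyRange a (a + q) 1).foldl aLoopStep st
      = gg q (PySem.Int.mod a 2 == 0) st := by
  induction q with
  | zero => intro a st; simp [PySem.List.pyRange_one_eq_nil (le_refl a), gg]
  | succ n ih =>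
    intro a st
    rw [PySem.List.pyRange_one_cons (by omega : a < a + (n + 1 : Nat))]
    simp only [List.foldl_cons]
    have : a + (n + 1 : Nat) = (a + 1) + (n : Nat) := by push_cast; ring
    rw [this, ih (a + 1), aLoopStep_eq, mod_two_flip, gg]

-- the greedy loop's closed form: twice the final left-right difference
theorem gg_char : ∀ (q : Nat), ∀ (lcn rcn : Nat), q = lcn + rcn → ∀ (ls rs : Int),
    2 * ((gg q true (ls, rs, (lcn : Int), (rcn : Int))).1
          - (gg q true (ls, rs, (lcn : Int), (rcn : Int))).2.1)
      = 2 * (ls - rs) + 9 * ((lcn : Int) - rcn + (((lcn + rcn) % 2 : Nat) : Int)) := by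
  intro q
  induction q using Nat.strong_induction_on with
  | _ q ih =>
    match q, ih with
    | 0, _ =>
      intro lcn rcn hq ls rs
      have h1 : lcn = 0 := by omega
      have h2 : rcn = 0 := by omega
      subst h1; subst h2; simp [gg]
    | 1, _ =>
      intro lcn rcn hq ls rs
      rcases Nat.eq_zero_or_pos lcn with h | h
      · subst h; have : rcn = 1 := by omega
        subst this; simp [gg, aStepP]
      · have h1 : lcn = 1 := by omega
        have h2 : rcn = 0 := by omega
        subst h1; subst h2; simp [gg, aStepP]; ring
    | (n + 2), ih =>
      intro lcn rcn hq ls rs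
      have step2 : ∀ s, gg (n + 2) true s = gg n true (aStepP false (aStepP true s)) := by
        intro s; rfl
      rw [step2]
      rcases Nat.eq_zero_or_pos lcn with hlc | hlc
      · -- lcn = 0, so rcn = n + 2: both steps hit the right side
        subst hlc
        have hr : rcn = n + 2 := by omega
        have e12 : aStepP false (aStepP true ((ls : Int), rs, ((0 : Nat) : Int), (rcn : Int)))
            = (ls, rs + 9, ((0 : Nat) : Int), ((rcn - 2 : Nat) : Int)) := by
          have h2 : 2 ≤ rcn := by omega
          simp [aStepP]
          rw [if_pos (show (1 : Nat) < rcn by omega)]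
          simp only [Prod.mk.injEq, true_and]
          omega
        rw [e12, ih n (by omega) 0 (rcn - 2) (by omega) ls (rs + 9)]
        have hm : ((0 + (rcn - 2) : Nat) % 2 : Nat) = ((0 + rcn : Nat) % 2 : Nat) := by omega
        rw [hm]; push_cast; omega
      · -- lcn > 0: first step adds 9 on the left
        obtain ⟨m, rfl⟩ : ∃ m, lcn = m + 1 := ⟨lcn - 1, by omega⟩
        have e1 : aStepP true ((ls : Int), rs, ((m + 1 : Nat) : Int), (rcn : Int))
            = (ls + 9, rs, (m : Int), (rcn : Int)) := by
          simp [aStepP]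
        rw [e1]
        rcases Nat.eq_zero_or_pos rcn with hrc | hrc
        · -- rcn = 0: second step decrements the left count without adding
          subst hrc
          have hm2 : m = n + 1 := by omega
          have e2 : aStepP false ((ls : Int) + 9, rs, (m : Int), ((0 : Nat) : Int))
              = (ls + 9, rs, ((m - 1 : Nat) : Int), ((0 : Nat) : Int)) := by
            simp [aStepP]
            all_goals omega
          rw [e2, ih n (by omega) (m - 1) 0 (by omega) (ls + 9) rs]
          have hmod : ((m - 1 + 0 : Nat) % 2 : Nat) = ((m + 1 + 0 : Nat) % 2 : Nat) := by omega
          rw [hmod]; push_cast; omega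
        · -- rcn > 0: second step adds 9 on the right
          obtain ⟨k, rfl⟩ : ∃ k, rcn = k + 1 := ⟨rcn - 1, by omega⟩
          have e2 : aStepP false ((ls : Int) + 9, rs, (m : Int), ((k + 1 : Nat) : Int))
              = (ls + 9, rs + 9, (m : Int), (k : Int)) := by
            simp [aStepP]
          rw [e2, ih n (by omega) m k (by omega) (ls + 9) (rs + 9)]
          have hmod : ((m + k : Nat) % 2 : Nat) = ((m + 1 + (k + 1) : Nat) % 2 : Nat) := by omega
          rw [hmod]; push_cast; omega

-- canAliceWin's closed form
theorem canAliceWinA_char (lcn rcn : Nat) (ls rs : Int) :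
    canAliceWinA ls rs (lcn : Int) (rcn : Int)
      = decide (2 * (ls - rs) + 9 * ((lcn : Int) - rcn + (((lcn + rcn) % 2 : Nat) : Int)) ≠ 0) := by
  unfold canAliceWinA
  have h0 : (lcn : Int) + (rcn : Int) = (0 : Int) + ((lcn + rcn : Nat) : Int) := by push_cast; ring
  rw [h0, foldl_pyRange_gg (lcn + rcn) 0]
  have hm : (PySem.Int.mod 0 2 == 0) = true := by decide
  rw [hm]
  have hc := gg_char (lcn + rcn) lcn rcn rfl ls rs
  set s := gg (lcn + rcn) true (ls, rs, (lcn : Int), (rcn : Int)) with hs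
  rcases Bool.eq_false_or_eq_true (s.1 != s.2.1) with hne | hne <;> rw [hne] <;>
    [ (simp only [bne_iff_ne, ne_eq] at hne;
       symm; simp only [decide_eq_true_iff, ne_eq]; omega);
      (simp only [bne_eq_false_iff_eq] at hne;
       symm; simp only [decide_eq_false_iff_not, not_not]; omega) ]

-- the per-character value B accumulates on a non-'?' character
def sumD : List Char → Int
  | [] => 0
  | c :: xs => (if c = '?' then 0 else pyIntChar c) + sumD xs

theorem foldl_sumA (xs : List Char) : ∀ (a : Int),
    xs.foldl (fun acc c => if c != '?' then acc + pyIntChar c else acc) a = a + sumD xs := by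
  induction xs with
  | nil => intro a; simp [sumD]
  | cons c xs ih =>
    intro a
    simp only [List.foldl_cons, ih, sumD]
    by_cases h : c = '?' <;> simp [h] <;> ring

theorem foldl_bStep_left (half : Int) (xs : List Char) : ∀ (s ls rs lc rc : Int),
    (s + (xs.length : Int) ≤ half) →
    (PySem.List.enumerate xs s).foldl (bStep half) (ls, rs, lc, rc)
      = (ls + sumD xs, rs, lc + (xs.count '?' : Nat), rc) := by
  induction xs with
  | nil => intro s ls rs lc rc _; simp [PySem.List.enumerate_nil, sumD]
  | cons c xs ih =>
    intro s ls rs lc rc hlen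
    rw [PySem.List.enumerate_cons]
    simp only [List.foldl_cons]
    have hlt : s < half := by
      have : (0 : Int) ≤ (xs.length : Int) := by positivity
      simp only [List.length_cons] at hlen; push_cast at hlen; omega
    by_cases h : c = '?'
    · have e : bStep half (ls, rs, lc, rc) (s, c) = (ls, rs, lc + 1, rc) := by
        simp [bStep, h, hlt]
      rw [e, ih (s + 1) _ _ _ _ (by simp at hlen ⊢; omega)]
      simp [sumD, h]
      all_goals omega
    · have e : bStep half (ls, rs, lc, rc) (s, c) = (ls + pyIntChar c, rs, lc, rc) := by
        simp [bStep, h, hlt]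
      rw [e, ih (s + 1) _ _ _ _ (by simp at hlen ⊢; omega)]
      simp [sumD, h]
      all_goals omega

theorem foldl_bStep_right (half : Int) (xs : List Char) : ∀ (s ls rs lc rc : Int),
    (half ≤ s) →
    (PySem.List.enumerate xs s).foldl (bStep half) (ls, rs, lc, rc)
      = (ls, rs + sumD xs, lc, rc + (xs.count '?' : Nat)) := by
  induction xs with
  | nil => intro s ls rs lc rc _; simp [PySem.List.enumerate_nil, sumD]
  | cons c xs ih =>
    intro s ls rs lc rc hge
    rw [PySem.List.enumerate_cons]
    simp only [List.foldl_cons]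
    have hlt : ¬ (s < half) := by omega
    by_cases h : c = '?'
    · have e : bStep half (ls, rs, lc, rc) (s, c) = (ls, rs, lc, rc + 1) := by
        simp [bStep, h, hlt]
      rw [e, ih (s + 1) _ _ _ _ (by omega)]
      simp [sumD, h]
      all_goals omega
    · have e : bStep half (ls, rs, lc, rc) (s, c) = (ls, rs + pyIntChar c, lc, rc) := by
        simp [bStep, h, hlt]
      rw [e, ih (s + 1) _ _ _ _ (by omega)]
      simp [sumD, h]
      all_goals omega

-- ===== VERDICT (by name: the statement is the Claim_ definition above) =====
theorem sumGame_spec : Claim_equal_sumGame := by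
  intro nums _ _
  unfold Spec_sumGame
  simp only [sumGame, sumGame_alt]
  set cs := nums.toList with hcs
  have hlen : PySem.Str.len nums = (cs.length : Int) := by
    simp [PySem.Str.len_eq, hcs]
  rw [hlen]
  set h : Nat := cs.length / 2 with hh
  have hhalf : PySem.Int.floordiv (cs.length : Int) 2 = (h : Int) := by
    exact_mod_cast PySem.Int.floordiv_natCast cs.length 2
  rw [hhalf]
  have hsl : PySem.List.slice cs none (some (h : Int)) = cs.take h :=
    PySem.List.slice_to_natCast cs h
  have hsr : PySem.List.slice cs (some (h : Int)) none = cs.drop h :=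
    PySem.List.slice_from_natCast cs h
  rw [hsl, hsr]
  -- B's single pass over enumerate splits at h
  have hsplit : cs = cs.take h ++ cs.drop h := (List.take_append_drop h cs).symm
  have hlentake : (cs.take h).length = h := by
    simp [List.length_take]; omega
  have henum : PySem.List.enumerate cs 0
      = PySem.List.enumerate (cs.take h) 0 ++ PySem.List.enumerate (cs.drop h) (0 + (cs.take h).length) := by
    conv_lhs => rw [hsplit]
    exact PySem.List.enumerate_append (cs.take h) (cs.drop h) 0
  rw [henum, List.foldl_append]
  rw [foldl_bStep_left (h : Int) (cs.take h) 0 0 0 0 0 (by rw [hlentake]; omega)]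
  rw [foldl_bStep_right (h : Int) (cs.drop h) (0 + (cs.take h).length) _ _ _ _ (by rw [hlentake]; omega)]
  -- A's four slice passes give the same four quantities
  rw [foldl_sumA (cs.take h) 0, foldl_sumA (cs.drop h) 0]
  have hcl : PySem.List.count (cs.take h) '?' = (cs.take h).count '?' := PySem.List.count_eq _ _
  have hcr : PySem.List.count (cs.drop h) '?' = (cs.drop h).count '?' := PySem.List.count_eq _ _
  rw [hcl, hcr]
  set SL := sumD (cs.take h)
  set SR := sumD (cs.drop h)
  set CL := (cs.take h).count '?'
  set CR := (cs.drop h).count '?'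
  simp only [zero_add]
  rw [canAliceWinA_char CL CR SL SR, canAliceWinA_char CR CL SR SL]
  -- the closed-form comparison
  have hcc : (CR + CL) % 2 = (CL + CR) % 2 := by omega
  rw [hcc]
  have hq : (CL : Int) + (CR : Int) = ((CL + CR : Nat) : Int) := by push_cast; ring
  have hmodq : PySem.Int.mod ((CL + CR : Nat) : Int) 2 = (((CL + CR) % 2 : Nat) : Int) := by
    exact_mod_cast PySem.Int.mod_natCast (CL + CR) 2
  rw [hq, hmodq]
  rcases Nat.mod_two_eq_zero_or_one (CL + CR) with hp | hp
  · -- q even: both greedy calls test the same quantity, which is B's arithmetic test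
    simp only [hp, Nat.cast_zero, add_zero]
    rw [Bool.eq_iff_iff]
    simp only [show ((0 : Int) == 1) = false from by decide, Bool.false_eq_true, if_false,
      Bool.or_eq_true, decide_eq_true_iff, ne_eq, bne_iff_ne]
    constructor
    · rintro (h1 | h2) <;> intro hEq <;> [exact h1 (by omega); exact h2 (by omega)]
    · intro hne; left; intro hEq; exact hne (by omega)
  · -- q odd: Alice always wins, and both sides are true
    simp only [hp, Nat.cast_one]
    rw [Bool.eq_iff_iff]
    simp only [show ((1 : Int) == 1) = true from by decide, if_true, Bool.or_eq_true,
      decide_eq_true_iff, ne_eq, iff_true]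
    by_cases hz : 2 * (SL - SR) + 9 * ((CL : Int) - CR + 1) = 0
    · right; omega
    · left; exact hz
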